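-- pv_equiv track=rewrite | github.com/wineslab/xDevSM | sm_framework/py_oran/kpm/function_definition_builder.py | _remove_undecoded_bytes
-- ===== SOURCE A (Python) =====
-- def _remove_undecoded_bytes(input_string):
--     # Convert octet string to bytes
--
--     # Initialize an empty string for the decoded output
--     decoded_string = ""
--
--     for byte in input_string:
--         # Check if the byte is printable ASCII character
--         if 32 <= byte <= 126:
--             decoded_string += chr(byte)
--         # Replace '\x02' with ' ' (space)
--         elif byte == 0x02:
--             decoded_string += " "
--         # Replace '\x00' with ' ' (space)
--         elif byte == 0x00:
--             decoded_string += " "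
--
--     # Remove multiple consecutive spaces
--     decoded_string = ' '.join(decoded_string.split())
--
--     decoded_string = decoded_string.replace("@", "").replace("`", "")
--     return decoded_string
-- ===== SOURCE B (Python) =====
-- def _remove_undecoded_bytes(input_string):
--     # One-pass tokenizer: split into words directly while decoding,
--     # instead of building a string and re-splitting it.
--     SPACE = {0x00, 0x02, 0x20}
--     tokens = []
--     cur = []
--     for b in input_string:
--         if b in SPACE:
--             if cur:
--                 tokens.append(''.join(cur))
--                 cur = []
--         elif 32 < b <= 126:
--             cur.append(chr(b))
--     if cur:
--         tokens.append(''.join(cur))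
--     return ' '.join(tokens).replace("@", "").replace("`", "")
-- ===== Notes on version B (the rewrite author's own statement) =====
-- stated objective: alternative
-- what changed: B tokenizes in a single pass (flushing words on 0x00/0x02/0x20 and skipping non-printables) instead of building a filtered string and re-splitting it with split()/join.
import Mathlib
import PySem

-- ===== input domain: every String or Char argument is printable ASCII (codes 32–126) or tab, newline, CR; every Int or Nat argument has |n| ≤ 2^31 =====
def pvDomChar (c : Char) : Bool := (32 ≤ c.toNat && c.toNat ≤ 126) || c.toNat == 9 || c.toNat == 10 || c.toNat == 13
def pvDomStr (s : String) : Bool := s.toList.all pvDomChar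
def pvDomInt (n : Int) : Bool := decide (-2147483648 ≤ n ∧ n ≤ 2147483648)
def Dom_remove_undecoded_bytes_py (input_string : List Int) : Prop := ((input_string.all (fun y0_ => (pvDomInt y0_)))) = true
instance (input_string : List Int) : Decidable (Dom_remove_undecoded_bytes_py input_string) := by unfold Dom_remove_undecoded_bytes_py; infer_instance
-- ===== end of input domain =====

-- B replaces A's build-then-resplit (filter into a string, then split()/' '.join) by a
-- single-pass tokenizer that flushes a word on 0x00/0x02/0x20 and skips non-printables.

-- ===== PORT A =====
def remove_undecoded_bytes_py (input_string : List Int) : String :=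
  String.ofList (PySem.Chars.replace (PySem.Chars.replace
    (PySem.Chars.join [' '] (PySem.Chars.split₀
      (input_string.foldl (fun s b =>
        if 32 ≤ b ∧ b ≤ 126 then s ++ [Char.ofNat b.toNat]
        else if b = 2 then s ++ [' ']
        else if b = 0 then s ++ [' ']
        else s) [])))
    ['@'] []) ['`'] [])

-- ===== PORT B =====
-- the tokenizing loop of Source B: cur is the word being built, toks the finished words
def pvTokenize (l : List Int) (cur : List Char) (toks : List (List Char)) : List (List Char) :=
  match l with
  | [] => if cur.isEmpty then toks else toks ++ [cur]
  | b :: rest =>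
    if b = 0 ∨ b = 2 ∨ b = 32 then
      pvTokenize rest [] (if cur.isEmpty then toks else toks ++ [cur])
    else if 32 < b ∧ b ≤ 126 then pvTokenize rest (cur ++ [Char.ofNat b.toNat]) toks
    else pvTokenize rest cur toks

def remove_undecoded_bytes_py_alt (input_string : List Int) : String :=
  String.ofList (PySem.Chars.replace (PySem.Chars.replace
    (PySem.Chars.join [' '] (pvTokenize input_string [] [])) ['@'] []) ['`'] [])

-- ===== PRECONDITION & SPEC =====
def Spec_remove_undecoded_bytes_py (input_string : List Int) (out : String) : Prop := out = remove_undecoded_bytes_py_alt input_string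
instance (input_string : List Int) (out : String) : Decidable (Spec_remove_undecoded_bytes_py input_string out) := by unfold Spec_remove_undecoded_bytes_py; infer_instance

-- ===== CLAIM (what is proved, stated in full; the proofs are below) =====
def Claim_equal_remove_undecoded_bytes_py : Prop := ∀ (input_string : List Int), Dom_remove_undecoded_bytes_py input_string → Spec_remove_undecoded_bytes_py input_string (remove_undecoded_bytes_py input_string)

-- ===== LEMMAS AND PROOFS =====

-- chars A's loop appends for one byte
def pvEmit (b : Int) : List Char :=
  if 32 ≤ b ∧ b ≤ 126 then [Char.ofNat b.toNat]
  else if b = 2 then [' ']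
  else if b = 0 then [' ']
  else []

theorem pv_foldl_emit (l : List Int) (s : List Char) :
    l.foldl (fun s b =>
        if 32 ≤ b ∧ b ≤ 126 then s ++ [Char.ofNat b.toNat]
        else if b = 2 then s ++ [' ']
        else if b = 0 then s ++ [' ']
        else s) s = s ++ l.flatMap pvEmit := by
  induction l generalizing s with
  | nil => simp
  | cons b rest ih =>
    simp only [List.foldl_cons, List.flatMap_cons, ih, pvEmit]
    split
    · simp
    · split
      · simp
      · split <;> simp

theorem pvTokenize_hoist (l : List Int) (cur : List Char) (toks : List (List Char)) :
    pvTokenize l cur toks = toks ++ pvTokenize l cur [] := by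
  induction l generalizing cur toks with
  | nil => simp only [pvTokenize]; split <;> simp
  | cons b rest ih =>
    simp only [pvTokenize]
    split
    · split
      · rw [ih]
      · simp only [List.nil_append]
        rw [ih, ih [] [cur]]
        simp
    · split <;> rw [ih]

theorem pv_isspace_ofNat_false (b : Int) (h1 : 32 < b) (h2 : b ≤ 126) :
    PySem.Chars.isspace (Char.ofNat b.toNat) = false := by
  have hn : (Char.ofNat b.toNat).toNat = b.toNat := by
    unfold Char.ofNat
    rw [dif_pos (by unfold Nat.isValidChar; omega)]
    simp [Char.ofNatAux, Char.toNat, UInt32.toNat_ofNatLT]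
  simp only [PySem.Chars.isspace, hn]
  simp only [Bool.or_eq_false_iff, Bool.and_eq_false_iff, decide_eq_false_iff_not]
  omega

theorem pv_split_go_flatMap (l : List Int) (cur : List Char) (acc : List (List Char)) :
    PySem.Chars.split₀.go (l.flatMap pvEmit) cur acc
      = acc.reverse ++ pvTokenize l cur.reverse [] := by
  induction l generalizing cur acc with
  | nil =>
    simp only [List.flatMap_nil, PySem.Chars.split₀.go, pvTokenize, List.isEmpty_reverse]
    split <;> simp
  | cons b rest ih =>
    by_cases hsp : b = 0 ∨ b = 2 ∨ b = 32
    · have hemit : pvEmit b = [' '] := by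
        rcases hsp with h | h | h <;> subst h <;> simp [pvEmit]
      simp only [List.flatMap_cons, hemit, List.singleton_append,
        PySem.Chars.split₀.go, pvTokenize, hsp, if_pos, List.isEmpty_reverse]
      rw [show PySem.Chars.isspace ' ' = true from rfl]
      simp only [if_true]
      split
      · rw [ih]; simp
      · rw [ih, pvTokenize_hoist rest [] ([] ++ [cur.reverse])]; simp
    · rw [not_or, not_or] at hsp
      obtain ⟨h0, h2, h32⟩ := hsp
      by_cases hpr : 32 < b ∧ b ≤ 126
      · have hemit : pvEmit b = [Char.ofNat b.toNat] := by
          simp only [pvEmit]; rw [if_pos (by omega)]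
        simp only [List.flatMap_cons, hemit, List.singleton_append, PySem.Chars.split₀.go,
          pv_isspace_ofNat_false b hpr.1 hpr.2, Bool.false_eq_true, if_false]
        rw [ih]
        simp only [pvTokenize]
        rw [if_neg (by tauto), if_pos hpr]
        simp
      · have hemit : pvEmit b = [] := by
          simp only [pvEmit]
          rw [if_neg (by omega), if_neg h2, if_neg h0]
        simp only [List.flatMap_cons, hemit, List.nil_append]
        rw [ih]
        simp only [pvTokenize]
        rw [if_neg (by tauto), if_neg hpr]

-- ===== VERDICT (by name: the statement is the Claim_ definition above) =====
theorem remove_undecoded_bytes_py_spec : Claim_equal_remove_undecoded_bytes_py := by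
  intro input_string _
  unfold Spec_remove_undecoded_bytes_py remove_undecoded_bytes_py remove_undecoded_bytes_py_alt
  rw [pv_foldl_emit input_string [], List.nil_append]
  rw [show PySem.Chars.split₀ (input_string.flatMap pvEmit)
        = PySem.Chars.split₀.go (input_string.flatMap pvEmit) [] [] from rfl,
      pv_split_go_flatMap input_string [] []]
  simp
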